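-- pv_equiv track=rewrite | github.com/sreerekha17/NPU-CS350 | Lab/Week2/#3-substring-unmatched.py | add_char
-- ===== SOURCE A (Python) =====
-- def add_char(wrd1, wrd2):
--     if(not(len(wrd1))): #if no more substring left to check, return all remaining
--         return wrd2
--     elif (wrd1 in wrd2): #if entire word matches, remove matching string from second word
--         removeWord = wrd1
--         wrd1 = wrd1.replace(removeWord, '', 1)
--         wrd2 = wrd2.replace(removeWord, '', 1)
--         return add_char(wrd1, wrd2)
--     else: #check letter by letter and remove matching letter from both word
--         removeWord = wrd1[0]
--         wrd1 = wrd1.replace(removeWord, '', 1)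
--         wrd2 = wrd2.replace(removeWord, '', 1)
--         return add_char(wrd1, wrd2)
-- ===== SOURCE B (Python) =====
-- def add_char(wrd1, wrd2):
--     # Iterative version: early-return on a whole-word match, otherwise slice out
--     # one character at a time using find-based index arithmetic.
--     while wrd1:
--         if wrd1 in wrd2:
--             i = wrd2.find(wrd1)
--             return wrd2[:i] + wrd2[i + len(wrd1):]
--         j = wrd2.find(wrd1[0])
--         if j != -1:
--             wrd2 = wrd2[:j] + wrd2[j + 1:]
--         wrd1 = wrd1[1:]
--     return wrd2
-- ===== Notes on version B (the rewrite author's own statement) =====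
-- stated objective: simpler
-- what changed: Replaced the tail recursion with a while loop over the two working strings, with an early return that slices out the whole-word match via find-based index arithmetic instead of str.replace, and advances wrd1 by slicing.
import Mathlib
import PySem

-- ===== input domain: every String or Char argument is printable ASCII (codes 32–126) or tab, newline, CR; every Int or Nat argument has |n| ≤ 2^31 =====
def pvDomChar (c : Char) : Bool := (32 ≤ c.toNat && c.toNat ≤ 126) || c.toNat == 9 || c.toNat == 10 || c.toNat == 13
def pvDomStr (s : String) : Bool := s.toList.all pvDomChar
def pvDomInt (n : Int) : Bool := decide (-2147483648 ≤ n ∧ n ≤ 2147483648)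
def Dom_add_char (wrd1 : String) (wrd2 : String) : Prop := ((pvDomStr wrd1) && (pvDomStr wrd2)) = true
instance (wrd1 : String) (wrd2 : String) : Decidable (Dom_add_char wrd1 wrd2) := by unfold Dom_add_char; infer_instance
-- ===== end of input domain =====

-- B rewrites A's tail recursion as an iterative loop with an early return; return values are equal (A does not mutate).

-- ===== PORT A =====
-- hand port of s.replace(sub, '', 1) for NONEMPTY sub: remove the first occurrence
-- (exact for nonempty sub: Python removes the occurrence at s.find(sub), or leaves s unchanged)
def pvRemoveFirst (sub s : List Char) : List Char :=
  let i := PySem.Chars.find s sub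
  if i = -1 then s else s.take i.toNat ++ s.drop (i.toNat + sub.length)

theorem pvRemoveFirst_prefix {sub s : List Char} (hpre : sub <+: s) :
    pvRemoveFirst sub s = s.drop sub.length := by
  have hinf : sub <:+: s := hpre.isInfix
  have h0 : 0 ≤ PySem.Chars.find s sub := (PySem.Chars.find_nonneg_iff s sub).mpr hinf
  have hspec := PySem.Chars.find_spec (s := s) (sub := sub) h0
  have hz : (PySem.Chars.find s sub).toNat = 0 := by
    by_contra h
    exact hspec.2 0 (Nat.pos_of_ne_zero h) (by simpa using hpre)
  have hfind : PySem.Chars.find s sub = 0 := by omega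
  simp [pvRemoveFirst, hfind]

theorem pvRemoveFirst_lt {sub s : List Char} (hpre : sub <+: s) (hne : sub ≠ []) :
    (pvRemoveFirst sub s).length < s.length := by
  rw [pvRemoveFirst_prefix hpre]
  have hle := hpre.length_le
  have hpos : 0 < sub.length := List.length_pos_iff.mpr hne
  simp only [List.length_drop]
  omega

-- literal port of A's recursion on (wrd1, wrd2) over code points
def addCharA : List Char → List Char → List Char
  | [], w2 => w2
  | c :: t, w2 =>
    if PySem.Chars.isIn (c :: t) w2 then
      addCharA (pvRemoveFirst (c :: t) (c :: t)) (pvRemoveFirst (c :: t) w2)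
    else
      addCharA (pvRemoveFirst [c] (c :: t)) (pvRemoveFirst [c] w2)
  termination_by w1 _ => w1.length
  decreasing_by
  · exact pvRemoveFirst_lt (List.prefix_refl _) (by simp)
  · exact pvRemoveFirst_lt ⟨t, rfl⟩ (by simp)

def add_char (wrd1 : String) (wrd2 : String) : String :=
  String.ofList (addCharA wrd1.toList wrd2.toList)

-- ===== PORT B =====
-- literal port of B: iterate over wrd1, early-return the whole-word slice splice,
-- otherwise splice out the first occurrence of wrd1[0] (find-based slicing; find result
-- is nonnegative in the branches where the slices are taken, so take/drop are exact)
def addCharB : List Char → List Char → List Char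
  | [], w2 => w2
  | c :: t, w2 =>
    if PySem.Chars.isIn (c :: t) w2 then
      let i := (PySem.Chars.find w2 (c :: t)).toNat
      w2.take i ++ w2.drop (i + (c :: t).length)
    else
      let j := PySem.Chars.find w2 [c]
      addCharB t (if j = -1 then w2 else w2.take j.toNat ++ w2.drop (j.toNat + 1))

def add_char_alt (wrd1 : String) (wrd2 : String) : String :=
  String.ofList (addCharB wrd1.toList wrd2.toList)

-- ===== PRECONDITION & SPEC =====
def Spec_add_char (wrd1 : String) (wrd2 : String) (out : String) : Prop := out = add_char_alt wrd1 wrd2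
instance (wrd1 : String) (wrd2 : String) (out : String) : Decidable (Spec_add_char wrd1 wrd2 out) := by unfold Spec_add_char; infer_instance

-- ===== CLAIM (what is proved, stated in full; the proofs are below) =====
def Claim_equal_add_char : Prop := ∀ (wrd1 : String) (wrd2 : String), Dom_add_char wrd1 wrd2 → Spec_add_char wrd1 wrd2 (add_char wrd1 wrd2)

-- ===== LEMMAS AND PROOFS =====

theorem addCharA_eq_addCharB (w1 : List Char) : ∀ w2, addCharA w1 w2 = addCharB w1 w2 := by
  induction w1 with
  | nil => intro w2; rw [addCharA, addCharB]
  | cons c t ih =>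
    intro w2
    rw [addCharA, addCharB]
    by_cases h : PySem.Chars.isIn (c :: t) w2 = true
    · simp only [h, if_true]
      -- A removes the whole word from wrd1 (leaving []) and recurses once more
      rw [pvRemoveFirst_prefix (List.prefix_refl _), List.drop_length, addCharA]
      have hne : PySem.Chars.find w2 (c :: t) ≠ -1 :=
        (PySem.Chars.find_ne_neg_one_iff w2 (c :: t)).mpr
          ((PySem.Chars.isIn_iff_infix (c :: t) w2).mp h)
      simp [pvRemoveFirst, hne]
    · rw [if_neg h, if_neg h,
        pvRemoveFirst_prefix (sub := [c]) (s := c :: t) ⟨t, rfl⟩]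
      simp only [List.length_cons, List.length_nil, Nat.zero_add, List.drop_one, List.tail_cons]
      rw [ih]
      congr 1

-- ===== VERDICT (by name: the statement is the Claim_ definition above) =====
theorem add_char_spec : Claim_equal_add_char := by
  intro wrd1 wrd2 _
  unfold Spec_add_char add_char add_char_alt
  rw [addCharA_eq_addCharB]
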